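-- pv_equiv track=rewrite | github.com/hobbitalastair/misc | landau.py | add_factor
-- ===== SOURCE A (Python) =====
-- def product(factors):
--     """ Return the product of the given set of numbers """
--     product = 1
--     for i in factors:
--         product *= i
--     return product
--
-- def add_factor(i, n, factors):
--     """ Try to add the given factor to the list of factors.
--
--         This removes elements, starting with the largest and working down to
--         the smallest, until the new element can fit.
--         It only actually adds the element if it will be beneficial.
--
--         TODO: The choice of factors to remove is arbitary and broken; for
--               example, see landau(9) (should be 20)
--     """
--
--     new_factors = factors.copy()
--     while sum(new_factors) + i > n:
--         try:
--             new_factors.remove(max(new_factors))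
--         except ValueError: # Nothing left to remove; abandon ship.
--             break
--     if product(factors.difference(new_factors)) <= i:
--         new_factors.add(i)
--         return new_factors
--
--     return factors
-- ===== SOURCE B (Python) =====
-- def add_factor(i, n, factors):
--     """Sort once, then walk the sorted list from the top until the remainder
--     plus i fits, accumulating the removed elements' product on the fly."""
--     s = sorted(factors)
--     total = sum(s)
--     k = len(s)                  # first k sorted elements are kept
--     prod = 1                    # product of the removed elements
--     while k > 0 and total + i > n:
--         k -= 1
--         total -= s[k]
--         prod *= s[k]
--     if prod <= i:
--         keep = set(s[:k])
--         kept = {x for x in factors if x in keep}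
--         kept.add(i)
--         return kept
--     return factors
-- ===== Notes on version B (the rewrite author's own statement) =====
-- stated objective: alternative
-- what changed: Instead of repeatedly recomputing sum/max and removing the max from the set (O(k) work per removal), B sorts the set once and walks the sorted list from the top, maintaining the running sum and the product of removed elements in one pass.
import Mathlib
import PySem

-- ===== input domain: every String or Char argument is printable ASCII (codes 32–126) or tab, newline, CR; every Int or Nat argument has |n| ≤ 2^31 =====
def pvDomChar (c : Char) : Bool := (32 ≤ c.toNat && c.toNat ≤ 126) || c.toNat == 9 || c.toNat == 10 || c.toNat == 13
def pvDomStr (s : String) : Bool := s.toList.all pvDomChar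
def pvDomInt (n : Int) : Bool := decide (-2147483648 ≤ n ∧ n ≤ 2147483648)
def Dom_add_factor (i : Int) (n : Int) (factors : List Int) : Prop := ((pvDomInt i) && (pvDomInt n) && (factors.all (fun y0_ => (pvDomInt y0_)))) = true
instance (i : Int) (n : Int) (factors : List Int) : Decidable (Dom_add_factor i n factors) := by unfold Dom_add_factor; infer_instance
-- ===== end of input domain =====

-- B sorts the set once and walks the sorted list from the top with a running sum and product,
-- instead of A's repeated sum/max/remove passes over the set (objective: alternative).


-- ===== PORT A =====
-- product(factors): loop multiplying the elements (iterating a set: Int * is commutative, order-independent)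
def pyProduct (xs : List Int) : Int := xs.foldl (fun p x => p * x) 1

-- 'while sum(new_factors) + i > n: new_factors.remove(max(new_factors))', break when max raises
-- ValueError on the empty set. set.remove of the max (present by max?_mem) is exact as nf.erase m
-- (PySem.List.remove?_eq_some_erase).
def removeLoopA (i : Int) (n : Int) (nf : PySem.Set Int) : PySem.Set Int :=
  if nf.sum + i > n then
    match h : PySem.List.max? nf (fun x => x) with
    | none => nf
    | some m => removeLoopA i n (nf.erase m)
  else nf
termination_by nf.length
decreasing_by
  rw [List.length_erase_of_mem (PySem.List.max?_mem h)]
  exact Nat.sub_lt (List.length_pos_of_mem (PySem.List.max?_mem h)) Nat.one_pos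

-- the set argument 'factors' is modelled by its distinct elements: PySem.Set.ofList factors
def add_factor (i : Int) (n : Int) (factors : List Int) : List Int :=
  let fs := PySem.Set.ofList factors
  let nf := removeLoopA i n fs
  if pyProduct (PySem.Set.diff fs nf) ≤ i then PySem.Set.add nf i else fs

-- ===== PORT B =====
-- 'while k > 0 and total + i > n: k -= 1; total -= s[k]; prod *= s[k]' walks s from the top,
-- i.e. consumes s.reverse; returns (number of elements removed, prod).
def shrinkB (i : Int) (n : Int) : List Int → Int → Int → Nat × Int
  | rs, total, prod =>
    if total + i > n then
      match rs with
      | [] => (0, prod)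
      | x :: t =>
        let r := shrinkB i n t (total - x) (prod * x)
        (r.1 + 1, r.2)
    else (0, prod)

def add_factor_alt (i : Int) (n : Int) (factors : List Int) : List Int :=
  let s := PySem.List.sorted (PySem.Set.ofList factors) (fun x => x)
  let r := shrinkB i n s.reverse s.sum 1
  let k := s.length - r.1
  if r.2 ≤ i then
    let keep := s.take k        -- set(s[:k]): the slice is already distinct
    -- {x for x in factors if x in keep}: a set built from a set, order-independent as a set
    let kept := (PySem.Set.ofList factors).filter (fun x => keep.contains x)
    PySem.Set.add kept i
  else PySem.Set.ofList factors

-- ===== PRECONDITION & SPEC =====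
def Spec_add_factor (i : Int) (n : Int) (factors : List Int) (out : List Int) : Prop := out = add_factor_alt i n factors
instance (i : Int) (n : Int) (factors : List Int) (out : List Int) : Decidable (Spec_add_factor i n factors out) := by unfold Spec_add_factor; infer_instance

-- ===== CLAIM (what is proved, stated in full; the proofs are below) =====
def Claim_equal_add_factor : Prop := ∀ (i : Int) (n : Int) (factors : List Int), Dom_add_factor i n factors → Spec_add_factor i n factors (add_factor i n factors)

-- ===== LEMMAS AND PROOFS =====

-- the count component of shrinkB, independent of the product accumulator
def cntB (i : Int) (n : Int) : List Int → Int → Nat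
  | rs, total =>
    if total + i > n then
      match rs with
      | [] => 0
      | x :: t => cntB i n t (total - x) + 1
    else 0

theorem shrinkB_fst (i n : Int) (rs : List Int) (total prod : Int) :
    (shrinkB i n rs total prod).1 = cntB i n rs total := by
  induction rs generalizing total prod with
  | nil => rw [shrinkB, cntB]; split <;> simp
  | cons x t ih => rw [shrinkB, cntB]; split <;> simp [ih]

theorem shrinkB_snd (i n : Int) (rs : List Int) (total prod : Int) :
    (shrinkB i n rs total prod).2 = prod * (rs.take (cntB i n rs total)).prod := by
  induction rs generalizing total prod with
  | nil => rw [shrinkB, cntB]; split <;> simp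
  | cons x t ih => rw [shrinkB, cntB]; split <;> simp [ih, mul_assoc]

theorem cntB_le_length (i n : Int) (rs : List Int) (total : Int) :
    cntB i n rs total ≤ rs.length := by
  induction rs generalizing total with
  | nil => rw [cntB]; split <;> simp
  | cons x t ih => rw [cntB]; split <;> simp [ih]

-- the ascending sort of a list ends with its Python max
theorem sorted_erase_max (fs : List Int) (m : Int)
    (hm : PySem.List.max? fs (fun x => x) = some m) :
    PySem.List.sorted fs (fun x => x) = PySem.List.sorted (fs.erase m) (fun x => x) ++ [m] := by
  have hmem : m ∈ fs := PySem.List.max?_mem hm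
  apply PySem.List.eq_of_perm_of_pairwise_le_of_injective (fun x => x) (fun a b h => h)
  · refine ((PySem.List.sorted_perm fs (fun x => x) false).trans
      ((List.perm_cons_erase hmem).trans ?_)).trans
      (((PySem.List.sorted_perm (fs.erase m) (fun x => x) false).symm).append_right _)
    simpa using (List.perm_append_comm (l₁ := [m]) (l₂ := fs.erase m))
  · exact PySem.List.sorted_pairwise _ _
  · rw [List.pairwise_append]
    refine ⟨PySem.List.sorted_pairwise _ _, by simp, ?_⟩
    intro a ha b hb
    have hb' : b = m := by simpa using hb
    have : a ∈ fs.erase m := ((PySem.List.sorted_perm _ _ _).mem_iff).mp ha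
    exact hb' ▸ PySem.List.max?_isMax hm a (List.mem_of_mem_erase this)

-- THE CORE: A's removal loop keeps exactly the first (length - cntB) sorted elements
theorem removeLoopA_eq (i n : Int) (fs : List Int) (hnd : fs.Nodup) :
    removeLoopA i n fs =
      fs.filter (fun x =>
        ((PySem.List.sorted fs (fun x => x)).take
          ((PySem.List.sorted fs (fun x => x)).length
            - cntB i n (PySem.List.sorted fs (fun x => x)).reverse fs.sum)).contains x) := by
  induction hN : fs.length using Nat.strong_induction_on generalizing fs with
  | _ N ih =>
  subst hN
  by_cases hc : fs.sum + i > n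
  · rw [removeLoopA]
    rw [if_pos hc]
    split
    · -- max? = none: fs = []
      rename_i h0
      have : fs = [] := (PySem.List.max?_eq_none_iff fs _).mp h0
      subst this; simp
    · rename_i m hmax
      have hmem : m ∈ fs := PySem.List.max?_mem hmax
      have hS : PySem.List.sorted fs (fun x => x)
          = PySem.List.sorted (fs.erase m) (fun x => x) ++ [m] := sorted_erase_max fs m hmax
      have hlt : (fs.erase m).length < fs.length := by
        rw [List.length_erase_of_mem hmem]
        exact Nat.sub_lt (List.length_pos_of_mem hmem) Nat.one_pos
      have hsum : fs.sum - m = (fs.erase m).sum := by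
        have := (List.perm_cons_erase hmem).sum_eq
        simp at this; omega
      set e := fs.erase m with he
      set se := PySem.List.sorted e (fun x => x) with hse
      have hct : cntB i n (PySem.List.sorted fs (fun x => x)).reverse fs.sum
          = cntB i n se.reverse e.sum + 1 := by
        rw [hS]; simp only [List.reverse_append, List.reverse_singleton, List.singleton_append]
        rw [cntB]; rw [if_pos hc, hsum]
      have hcle : cntB i n se.reverse e.sum ≤ se.length := by
        have := cntB_le_length i n se.reverse e.sum
        simpa using this
      set c := cntB i n se.reverse e.sum with hcdef
      have hk : (PySem.List.sorted fs (fun x => x)).length - (c + 1) = se.length - c := by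
        rw [hS]; simp only [List.length_append, List.length_cons, List.length_nil]; omega
      have htake : (PySem.List.sorted fs (fun x => x)).take (se.length - c)
          = se.take (se.length - c) := by
        rw [hS]; exact List.take_append_of_le_length (by omega)
      simp only [hct, hk, htake]
      have IH := ih _ hlt e (hnd.erase m) rfl
      rw [IH]
      simp only [← hse, ← hcdef]
      -- goal: fs.filter p = e.filter p  with p = contains (se.take (se.length - c))
      have hmnotin : m ∉ se.take (se.length - c) := by
        intro hmm
        have h1 : m ∈ se := List.mem_of_mem_take hmm
        have h2 : m ∈ e := (PySem.List.sorted_perm e (fun x => x) false).mem_iff.mp h1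
        exact (hnd.not_mem_erase) h2
      have hee : e = fs.filter (fun x => x != m) := hnd.erase_eq_filter m
      rw [hee, List.filter_filter]
      apply List.filter_congr
      intro x hx
      by_cases hxm : x ∈ se.take (se.length - c)
      · have hxne : x ≠ m := fun hxe => hmnotin (hxe ▸ hxm)
        simp [hxm, hxne]
      · simp only [List.contains_eq_mem, Bool.and_eq_left_iff_imp, decide_eq_true_eq,
          bne_iff_ne, ne_eq]
        intro h'
        exact absurd h' hxm
  · rw [removeLoopA, if_neg hc]
    have h0 : cntB i n (PySem.List.sorted fs (fun x => x)).reverse fs.sum = 0 := by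
      rw [cntB.eq_def]
      simp [hc]
    simp only [h0, Nat.sub_zero, List.take_length]
    symm
    rw [List.filter_eq_self]
    intro a ha
    simpa using (PySem.List.sorted_perm fs (fun x => x) false).mem_iff.mpr ha

theorem add_factor_eq_alt (i n : Int) (factors : List Int) :
    add_factor i n factors = add_factor_alt i n factors := by
  rw [add_factor, add_factor_alt]
  set fs := PySem.Set.ofList factors with hfs
  have hnd : fs.Nodup := PySem.Set.nodup_ofList factors
  set s := PySem.List.sorted fs (fun x => x) with hs
  have hsperm : s.Perm fs := PySem.List.sorted_perm fs _ false
  have hsnd : s.Nodup := (hsperm.nodup_iff).mpr hnd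
  have hsumeq : s.sum = fs.sum := hsperm.sum_eq
  set c := cntB i n s.reverse fs.sum with hcdef
  have hc1 : (shrinkB i n s.reverse s.sum 1).1 = c := by
    rw [shrinkB_fst, hsumeq]
  have hcle : c ≤ s.length := by
    have := cntB_le_length i n s.reverse fs.sum
    simpa using this
  set k := s.length - c with hkdef
  have hnf : removeLoopA i n fs = fs.filter (fun x => (s.take k).contains x) :=
    removeLoopA_eq i n fs hnd
  have hsplit := List.take_append_drop k s
  have hdisj : ∀ a, a ∈ s.take k → a ∉ s.drop k := by
    have : (s.take k ++ s.drop k).Nodup := by rw [hsplit]; exact hsnd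
    exact fun a ha hb => (List.nodup_append.mp this).2.2 a ha a hb rfl
  have hperm : (fs.filter (fun x => !((fs.filter (fun x => (s.take k).contains x)).contains x))).Perm
      ((s.drop k).reverse) := by
    rw [List.perm_ext_iff_of_nodup (hnd.filter _) (by simpa using hsnd.sublist (List.drop_sublist k s))]
    intro a
    simp only [List.mem_filter, List.contains_eq_mem, List.mem_reverse, Bool.not_eq_eq_eq_not,
      Bool.not_true, decide_eq_false_iff_not, List.mem_filter, decide_eq_true_eq, not_and]
    constructor
    · rintro ⟨ha, hno⟩
      have has : a ∈ s := hsperm.mem_iff.mpr ha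
      have : a ∈ s.take k ++ s.drop k := by rw [hsplit]; exact has
      rcases List.mem_append.mp this with h1 | h1
      · exact absurd h1 (hno ha)
      · exact h1
    · intro ha
      have has : a ∈ s := by rw [← hsplit]; exact List.mem_append.mpr (Or.inr ha)
      refine ⟨hsperm.mem_iff.mp has, fun _ h1 => hdisj a h1 ha⟩
  have hprod : pyProduct (PySem.Set.diff fs (removeLoopA i n fs)) = (shrinkB i n s.reverse s.sum 1).2 := by
    have hdiff : PySem.Set.diff fs (removeLoopA i n fs)
        = fs.filter (fun x => !((fs.filter (fun x => (s.take k).contains x)).contains x)) := by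
      rw [hnf]; simp [PySem.Set.diff, PySem.Set.contains]
    rw [hdiff, shrinkB_snd, hsumeq, ← hcdef, one_mul]
    have htr : s.reverse.take c = (s.drop k).reverse := by
      rw [List.take_reverse, hkdef]
    rw [htr]
    show List.foldl (fun p x => p * x) 1 _ = _
    rw [← List.prod_eq_foldl]
    exact hperm.prod_eq
  rw [hprod, hnf, hc1]

-- ===== VERDICT (by name: the statement is the Claim_ definition above) =====
theorem add_factor_spec : Claim_equal_add_factor := by
  intro i n factors _
  unfold Spec_add_factor
  exact add_factor_eq_alt i n factors
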